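-- pv_equiv track=rewrite | github.com/blhwong/algos_py | algo_exp/square_of_zeroes/main.py | get_is_square
-- ===== SOURCE A (Python) =====
-- def get_is_square(matrix, row, col):
--     found = False
--     for i in range(1, min(len(matrix) - row, len(matrix) - col)):
--         found = True
--         for j in range(i + 1):
--             top = matrix[row][col + j]
--             left = matrix[row + j][col]
--             bottom = matrix[row + i][col + i - j]
--             right = matrix[row + i - j][col + i]
--             if top != 0 or right != 0 or bottom != 0 or left != 0:
--                 found = False
--                 break
--
--         if found:
--             return True
--
--     return found
-- ===== SOURCE B (Python) =====
-- def get_is_square(matrix, row, col):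
--     n = len(matrix)
--     limit = min(n - row, n - col)
--     if limit <= 1:
--         return False
--
--     def run_right(r):
--         k = 0
--         while k < limit and matrix[r][col + k] == 0:
--             k += 1
--         return k
--
--     def run_down(c):
--         k = 0
--         while k < limit and matrix[row + k][c] == 0:
--             k += 1
--         return k
--
--     right_runs = [run_right(row + i) for i in range(limit)]
--     down_runs = [run_down(col + i) for i in range(limit)]
--     top = right_runs[0]
--     left = down_runs[0]
--     for i in range(1, limit):
--         if top > i and left > i and right_runs[i] > i and down_runs[i] > i:
--             return True
--     return False
-- ===== Notes on version B (the rewrite author's own statement) =====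
-- stated objective: alternative
-- what changed: B replaces A's per-size re-scan of all four border edges (checking every border cell for each candidate size) by zero-run lengths: it computes, once, the rightward zero-run of each row and the downward zero-run of each column starting at the anchor, and then each candidate square size is accepted by four O(1) run-length comparisons.
-- outside the precondition, e.g. on get_is_square([[-1, -1, 104], [-1]], -1, 0): A returns False, B raises IndexError
import Mathlib
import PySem

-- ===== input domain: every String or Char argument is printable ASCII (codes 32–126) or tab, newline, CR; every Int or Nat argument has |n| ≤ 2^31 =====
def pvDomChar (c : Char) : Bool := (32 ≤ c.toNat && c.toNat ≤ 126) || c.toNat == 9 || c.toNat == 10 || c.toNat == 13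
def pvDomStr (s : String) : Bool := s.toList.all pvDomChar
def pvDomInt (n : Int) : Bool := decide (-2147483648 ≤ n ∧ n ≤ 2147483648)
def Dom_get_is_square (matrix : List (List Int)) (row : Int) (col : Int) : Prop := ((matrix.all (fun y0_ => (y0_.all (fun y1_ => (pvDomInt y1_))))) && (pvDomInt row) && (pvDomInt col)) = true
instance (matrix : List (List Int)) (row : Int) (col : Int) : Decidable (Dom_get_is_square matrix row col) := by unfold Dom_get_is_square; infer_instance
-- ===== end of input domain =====

-- B replaces A's per-size re-scan of every border cell by zero-run lengths (rightward per row,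
-- downward per column, from the anchor), so each candidate size is four run comparisons; objective: alternative.

-- matrix[r][c]: exact Python (incl. negative-index wrap) wherever Python does not raise — i.e. on
-- all reads performed inside Pre_; 0 where Python would raise IndexError (such inputs are outside Pre_)
def pvCell (matrix : List (List Int)) (r c : Int) : Int :=
  ((PySem.List.pyGet? matrix r).bind (fun rw => PySem.List.pyGet? rw c)).getD 0

-- ===== PORT A =====
-- inner 'for j in range(i+1)' loop: returns the value of 'found' after the loop (break = false)
def aInner (matrix : List (List Int)) (row col i : Int) : List Int → Bool
  | [] => true
  | j :: js =>
    let top := pvCell matrix row (col + j)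
    let left := pvCell matrix (row + j) col
    let bottom := pvCell matrix (row + i) (col + i - j)
    let right := pvCell matrix (row + i - j) (col + i)
    if top ≠ 0 ∨ right ≠ 0 ∨ bottom ≠ 0 ∨ left ≠ 0 then false
    else aInner matrix row col i js

-- outer 'for i in range(1, …)' loop with the early 'return True'
def aOuter (matrix : List (List Int)) (row col : Int) : List Int → Bool
  | [] => false
  | i :: is =>
    if aInner matrix row col i (PySem.List.pyRange 0 (i + 1) 1) then true
    else aOuter matrix row col is

def get_is_square (matrix : List (List Int)) (row : Int) (col : Int) : Bool :=
  aOuter matrix row col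
    (PySem.List.pyRange 1 (min ((matrix.length : Int) - row) ((matrix.length : Int) - col)) 1)

-- ===== PORT B =====
-- 'k = 0; while k < limit and get(k) == 0: k += 1; return k' — fuel = limit.toNat realises k < limit
def bRun (get : Int → Int) : Nat → Int → Int
  | 0, k => k
  | fuel + 1, k => if get k == 0 then bRun get fuel (k + 1) else k

def get_is_square_alt (matrix : List (List Int)) (row : Int) (col : Int) : Bool :=
  let n : Int := matrix.length
  let limit := min (n - row) (n - col)
  if limit ≤ 1 then false
  else
    let runRight := fun (r : Int) => bRun (fun k => pvCell matrix r (col + k)) limit.toNat 0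
    let runDown := fun (c : Int) => bRun (fun k => pvCell matrix (row + k) c) limit.toNat 0
    let rightRuns := (PySem.List.pyRange 0 limit 1).map (fun i => runRight (row + i))
    let downRuns := (PySem.List.pyRange 0 limit 1).map (fun i => runDown (col + i))
    let top := PySem.List.pyGetD rightRuns 0 0
    let left := PySem.List.pyGetD downRuns 0 0
    (PySem.List.pyRange 1 limit 1).any (fun i =>
      decide (top > i) && decide (left > i) &&
      decide (PySem.List.pyGetD rightRuns i 0 > i) && decide (PySem.List.pyGetD downRuns i 0 > i))

-- ===== PRECONDITION & SPEC =====
-- Pre_ excludes ragged matrices (a row shorter than the matrix height) and anchors below -len(matrix):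
-- there the Python A raises IndexError on most inputs, and where it still returns, the value hinges on
-- which wrapped negative / out-of-range reads its scan order happens to reach first.
def Pre_get_is_square (matrix : List (List Int)) (row : Int) (col : Int) : Prop :=
  ((∀ r ∈ matrix, (matrix.length : Int) ≤ (r.length : Int)) ∧
      -(matrix.length : Int) ≤ row ∧ -(matrix.length : Int) ≤ col)
  ∨ min ((matrix.length : Int) - row) ((matrix.length : Int) - col) ≤ 1

instance (matrix : List (List Int)) (row : Int) (col : Int) : Decidable (Pre_get_is_square matrix row col) := by unfold Pre_get_is_square; infer_instance

def pvWitness_get_is_square : List (List Int) × Int × Int := ([[0, 0], [0, 1]], 0, 0)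

def Spec_get_is_square (matrix : List (List Int)) (row : Int) (col : Int) (out : Bool) : Prop := out = get_is_square_alt matrix row col
instance (matrix : List (List Int)) (row : Int) (col : Int) (out : Bool) : Decidable (Spec_get_is_square matrix row col out) := by unfold Spec_get_is_square; infer_instance

-- ===== CLAIM (what is proved, stated in full; the proofs are below) =====
def Claim_equal_get_is_square : Prop := ∀ (matrix : List (List Int)) (row : Int) (col : Int), Dom_get_is_square matrix row col → Pre_get_is_square matrix row col → Spec_get_is_square matrix row col (get_is_square matrix row col)

-- ===== LEMMAS AND PROOFS =====

theorem le_bRun (get : Int → Int) (fuel : Nat) (k : Int) : k ≤ bRun get fuel k := by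
  induction fuel generalizing k with
  | zero => simp [bRun]
  | succ f ih =>
    simp only [bRun]
    split
    · exact le_trans (by omega) (ih (k + 1))
    · exact le_refl k

theorem bRun_ge_iff (get : Int → Int) (fuel t : Nat) (k : Int) (ht : t ≤ fuel) :
    (k + (t : Int) ≤ bRun get fuel k) ↔ ∀ u : Int, k ≤ u → u < k + t → get u = 0 := by
  induction fuel generalizing k t with
  | zero =>
    have : t = 0 := by omega
    subst this
    constructor
    · intro _ u h1 h2; omega
    · intro _; simp [bRun]
  | succ f ih =>
    simp only [bRun]
    by_cases h0 : get k = 0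
    · rw [if_pos (by simpa using h0)]
      cases t with
      | zero =>
        constructor
        · intro _ u hu1 hu2; omega
        · intro _; have := le_bRun get f (k + 1); omega
      | succ t' =>
        have := ih (k := k + 1) (t := t') (by omega)
        constructor
        · intro hle u hu1 hu2
          rcases eq_or_lt_of_le hu1 with rfl | hgt
          · exact h0
          · exact this.mp (by push_cast at hle ⊢; omega) u (by omega) (by push_cast at hu2 ⊢; omega)
        · intro hall
          have h := this.mpr (fun u hu1 hu2 => hall u (by omega) (by push_cast at hu2 ⊢; omega))
          push_cast at h ⊢; omega
    · rw [if_neg (by simpa using h0)]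
      constructor
      · intro hle u hu1 hu2
        exfalso
        have ht0 : (t : Int) ≤ 0 := by omega
        omega
      · intro hall
        cases t with
        | zero => simp
        | succ t' => exact absurd (hall k (le_refl k) (by push_cast; omega)) h0

theorem aInner_eq_true_iff (matrix : List (List Int)) (row col i : Int) (l : List Int) :
    aInner matrix row col i l = true ↔
      ∀ j ∈ l, pvCell matrix row (col + j) = 0 ∧ pvCell matrix (row + i - j) (col + i) = 0 ∧
        pvCell matrix (row + i) (col + i - j) = 0 ∧ pvCell matrix (row + j) col = 0 := by
  induction l with
  | nil => simp [aInner]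
  | cons j js ih =>
    simp only [aInner]
    split
    · rename_i h
      simp only [Bool.false_eq_true, false_iff]
      intro hall
      have := hall j (List.mem_cons_self)
      tauto
    · rename_i h
      push Not at h
      rw [ih]
      constructor
      · intro hall x hx
        rcases List.mem_cons.mp hx with rfl | hx
        · exact ⟨h.1, h.2.1, h.2.2.1, h.2.2.2⟩
        · exact hall x hx
      · intro hall x hx
        exact hall x (List.mem_cons_of_mem _ hx)

theorem aOuter_eq_any (matrix : List (List Int)) (row col : Int) (l : List Int) :
    aOuter matrix row col l =
      l.any (fun i => aInner matrix row col i (PySem.List.pyRange 0 (i + 1) 1)) := by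
  induction l with
  | nil => simp [aOuter]
  | cons i is ih =>
    simp only [aOuter, List.any_cons, ih]
    split <;> simp_all

-- ===== VERDICT (by name: the statement is the Claim_ definition above) =====
theorem get_is_square_spec : Claim_equal_get_is_square := by
  intro matrix row col _hdom _hpre
  unfold Spec_get_is_square get_is_square get_is_square_alt
  set n : Int := (matrix.length : Int) with hn
  set limit := min (n - row) (n - col) with hlimit
  by_cases hl : limit ≤ 1
  · rw [if_pos hl, PySem.List.pyRange_one_eq_nil (by omega)]
    simp [aOuter]
  · rw [if_neg hl]
    push Not at hl
    rw [aOuter_eq_any]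
    apply PySem.List.any_congr_mem
    intro i hi
    rw [PySem.List.mem_pyRange_one] at hi
    -- indices of the mapped run lists
    rw [PySem.List.pyGetD_map_pyRange_of_nonneg _ _ _ _ (by omega) (by omega),
        PySem.List.pyGetD_map_pyRange_of_nonneg _ _ _ _ (by omega) (by omega),
        PySem.List.pyGetD_map_pyRange_of_nonneg _ _ _ _ (by omega) (by omega),
        PySem.List.pyGetD_map_pyRange_of_nonneg _ _ _ _ (by omega) (by omega)]
    rw [Bool.eq_iff_iff]
    simp only [Bool.and_eq_true, decide_eq_true_eq]
    rw [aInner_eq_true_iff]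
    have hrun : ∀ get : Int → Int, (bRun get limit.toNat 0 > i ↔ ∀ u : Int, 0 ≤ u → u < i + 1 → get u = 0) := by
      intro get
      have := bRun_ge_iff get limit.toNat (i + 1).toNat 0 (by omega)
      rw [Int.toNat_of_nonneg (by omega)] at this
      constructor
      · intro h; exact fun u hu1 hu2 => this.mp (by omega) u (by omega) (by omega)
      · intro h; have := this.mpr (fun u hu1 hu2 => h u (by omega) (by omega)); omega
    rw [hrun, hrun, hrun, hrun]
    constructor
    · intro hall
      refine ⟨⟨⟨?_, ?_⟩, ?_⟩, ?_⟩
      · intro u hu1 hu2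
        simpa using (hall u (by rw [PySem.List.mem_pyRange_one]; omega)).1
      · intro u hu1 hu2
        simpa using (hall u (by rw [PySem.List.mem_pyRange_one]; omega)).2.2.2
      · intro u hu1 hu2
        have := (hall (i - u) (by rw [PySem.List.mem_pyRange_one]; omega)).2.2.1
        rwa [show col + i - (i - u) = col + u by ring] at this
      · intro u hu1 hu2
        have := (hall (i - u) (by rw [PySem.List.mem_pyRange_one]; omega)).2.1
        rwa [show row + i - (i - u) = row + u by ring] at this
    · rintro ⟨⟨⟨htop, hleft⟩, hbot⟩, hright⟩ j hj
      rw [PySem.List.mem_pyRange_one] at hj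
      refine ⟨by simpa using htop j (by omega) (by omega), ?_, ?_, by simpa using hleft j (by omega) (by omega)⟩
      · have := hright (i - j) (by omega) (by omega)
        rwa [show row + (i - j) = row + i - j by ring] at this
      · have := hbot (i - j) (by omega) (by omega)
        rwa [show col + (i - j) = col + i - j by ring] at this
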